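-- pv_equiv track=rewrite | github.com/Dam0305/Algorithm | 이코테/[GREEDY] 문자열 뒤집기.py | solution
-- ===== SOURCE A (Python) =====
-- def solution(s):
--
--     move = 0
--     target = s[0]
--     if s.count('0') == 0 or s.count('1') == 0:
--         return 0
--
--     for i in range(len(s)-1):
--         if s[i] != s[i+1] and s[i+1] != target:
--             move += 1
--
--     return move
-- ===== SOURCE B (Python) =====
-- def solution(s):
--     target = s[0]
--     if s.count('0') == 0 or s.count('1') == 0:
--         return 0
--     # Complement counting: every position i>=1 holding a non-target character is either
--     # the start of a new run (what A counts) or a duplicate of its predecessor; so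
--     # A's answer = (# non-target characters) - (# equal-adjacent pairs of non-target chars).
--     non_target = len(s) - s.count(target)
--     dup_non_target = sum(1 for a, b in zip(s, s[1:]) if a == b and b != target)
--     return non_target - dup_non_target
-- ===== Notes on version B (the rewrite author's own statement) =====
-- stated objective: alternative
-- what changed: B replaces A's adjacent-transition scan by complement counting: answer = (number of non-target characters, via len(s)-s.count(target)) minus (number of equal-adjacent pairs of non-target characters), using the identity that every non-target position past index 0 either starts a run (A's count) or duplicates its predecessor.
import Mathlib
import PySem

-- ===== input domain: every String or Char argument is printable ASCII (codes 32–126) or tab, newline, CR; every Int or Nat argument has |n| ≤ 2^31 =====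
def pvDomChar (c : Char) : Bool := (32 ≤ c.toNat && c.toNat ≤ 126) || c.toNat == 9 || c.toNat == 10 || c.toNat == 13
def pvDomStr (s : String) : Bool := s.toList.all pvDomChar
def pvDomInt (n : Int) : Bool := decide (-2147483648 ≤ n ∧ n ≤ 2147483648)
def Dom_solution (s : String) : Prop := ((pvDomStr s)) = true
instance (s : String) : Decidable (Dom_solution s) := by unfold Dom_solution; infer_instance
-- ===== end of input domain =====

-- B replaces A's adjacent-transition scan by complement counting: the answer equals the number
-- of non-target characters minus the number of equal-adjacent non-target pairs (alternative
-- decomposition, same O(n) cost).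

-- ===== PORT A =====
def solution (s : String) : Int :=
  let l := s.toList
  match PySem.Chars.pyGet? l 0 with
  | none => 0   -- unreachable under Pre_solution: Python raises IndexError on the empty string
  | some target =>
    if PySem.Chars.count l ['0'] = 0 ∨ PySem.Chars.count l ['1'] = 0 then 0
    else
      (PySem.List.pyRange 0 ((PySem.List.len l) - 1)).foldl
        (fun move i =>
          if ¬ (PySem.List.pyGetD l i ' ' = PySem.List.pyGetD l (i + 1) ' ') ∧
             ¬ (PySem.List.pyGetD l (i + 1) ' ' = target)
          then move + 1 else move) 0

-- ===== PORT B =====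
def solution_alt (s : String) : Int :=
  let l := s.toList
  match PySem.Chars.pyGet? l 0 with
  | none => 0   -- unreachable under Pre_solution: Python raises IndexError on the empty string
  | some target =>
    if PySem.Chars.count l ['0'] = 0 ∨ PySem.Chars.count l ['1'] = 0 then 0
    else
      let nonTarget : Int := PySem.List.len l - (PySem.Chars.count l [target] : Int)
      let dup : Int :=
        (((l.zip (PySem.List.slice l (some 1) none)).filter
            (fun p => p.1 == p.2 && !(p.2 == target))).map (fun _ => (1 : Int))).sum
      nonTarget - dup

-- ===== PRECONDITION & SPEC =====
-- Pre_ excludes only the empty string, on which both Pythons raise IndexError at s[0].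
def Pre_solution (s : String) : Prop := s ≠ ""
instance (s : String) : Decidable (Pre_solution s) := by unfold Pre_solution; infer_instance
def pvWitness_solution : String := "0011"

def Spec_solution (s : String) (out : Int) : Prop := out = solution_alt s
instance (s : String) (out : Int) : Decidable (Spec_solution s out) := by unfold Spec_solution; infer_instance

-- ===== CLAIM (what is proved, stated in full; the proofs are below) =====
def Claim_equal_solution : Prop := ∀ (s : String), Dom_solution s → Pre_solution s → Spec_solution s (solution s)

-- ===== LEMMAS AND PROOFS =====

-- Chars.count with a single-character pattern is List.count.
theorem count_go_singleton (c : Char) (l : List Char) :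
    ∀ (fuel acc : Nat), l.length ≤ fuel →
      PySem.Chars.count.go [c] fuel l acc = acc + l.count c := by
  induction l with
  | nil => intro fuel acc _; cases fuel <;> simp [PySem.Chars.count.go]
  | cons h t ih =>
    intro fuel acc hf
    cases fuel with
    | zero => simp at hf
    | succ f =>
      by_cases hc : c = h
      · subst hc
        rw [PySem.Chars.count.go]
        simp only [List.isPrefixOf, BEq.rfl, Bool.true_and, if_pos]
        rw [List.length_singleton, List.drop_one, List.tail_cons,
          ih f (acc + 1) (by simpa using hf)]
        simp
        omega
      · rw [PySem.Chars.count.go]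
        rw [if_neg (by
            simp only [List.isPrefixOf_iff_prefix, List.cons_prefix_cons]
            exact fun hp => hc hp.1),
          ih f acc (by simpa using hf)]
        simp [List.count_cons]
        exact fun h => absurd h.symm hc

theorem count_singleton (l : List Char) (c : Char) :
    PySem.Chars.count l [c] = l.count c := by
  rw [PySem.Chars.count]
  simp only [List.isEmpty_cons, if_neg Bool.false_ne_true]
  exact (count_go_singleton c l l.length 0 le_rfl).trans (by omega)

-- Counting over index pairs 0..n-2 equals counting over zip l l.tail.
theorem countP_range_adjacent (p : Char → Char → Bool) :
    ∀ (l : List Char),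
      (List.range (l.length - 1)).countP
        (fun k => p (l.getD k ' ') (l.getD (k + 1) ' ')) =
      (l.zip l.tail).countP (fun q => p q.1 q.2) := by
  intro l
  induction l with
  | nil => simp
  | cons a t ih =>
    cases t with
    | nil => simp
    | cons b r =>
      have hlen : (a :: b :: r).length - 1 = (b :: r).length - 1 + 1 := by
        simp
      rw [hlen, List.range_succ_eq_map, List.countP_cons, List.countP_map]
      have : ((List.range ((b :: r).length - 1)).countP
          (fun k => p ((a :: b :: r).getD (k + 1) ' ') ((a :: b :: r).getD (k + 1 + 1) ' '))) =
          (List.range ((b :: r).length - 1)).countP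
          (fun k => p ((b :: r).getD k ' ') ((b :: r).getD (k + 1) ' ')) := by
        refine List.countP_congr ?_
        intro k _
        simp
      simp only [Function.comp_def, Nat.succ_eq_add_one]
      rw [this, ih]
      simp [List.zip, List.countP_cons]

-- Splitting a countP by an extra boolean test.
theorem countP_split {α : Type} (l : List α) (p q : α → Bool) :
    l.countP p = l.countP (fun x => p x && q x) + l.countP (fun x => p x && !q x) := by
  induction l with
  | nil => simp
  | cons a t ih =>
    simp only [List.countP_cons, ih]
    cases hp : p a <;> cases hq : q a <;> simp <;> omega

theorem map_snd_zip_tail (l : List Char) :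
    (l.zip l.tail).map Prod.snd = l.tail := by
  apply List.map_snd_zip
  cases l <;> simp

-- The core identity: A's transition count = non-target chars − equal-adjacent non-target pairs.
theorem solution_core (t : Char) (r : List Char) :
    ((PySem.List.pyRange 0 ((PySem.List.len (t :: r)) - 1)).foldl
        (fun move i =>
          if ¬ (PySem.List.pyGetD (t :: r) i ' ' = PySem.List.pyGetD (t :: r) (i + 1) ' ') ∧
             ¬ (PySem.List.pyGetD (t :: r) (i + 1) ' ' = t)
          then move + 1 else move) 0 : Int) =
    (PySem.List.len (t :: r) - (PySem.Chars.count (t :: r) [t] : Int)) -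
      ((((t :: r).zip (PySem.List.slice (t :: r) (some 1) none)).filter
          (fun p => p.1 == p.2 && !(p.2 == t))).map (fun _ => (1 : Int))).sum := by
  have hlen : PySem.List.len (t :: r) - 1 = ((r.length : Nat) : Int) := by
    simp [PySem.List.len]
  rw [hlen, PySem.List.foldl_ite_add_one, PySem.List.pyRange_zero_natCast, List.countP_map]
  rw [PySem.List.slice_from_one, List.tail_cons, PySem.List.sum_map_const_int,
    ← List.countP_eq_length_filter, count_singleton]
  -- rewrite the index-based predicate into getD form
  have hA : (List.range r.length).countP
      ((fun i => decide (¬ PySem.List.pyGetD (t :: r) i ' ' = PySem.List.pyGetD (t :: r) (i + 1) ' ' ∧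
          ¬ PySem.List.pyGetD (t :: r) (i + 1) ' ' = t)) ∘ (fun k : Nat => (k : Int))) =
      ((t :: r).zip r).countP (fun q => !(q.1 == q.2) && !(q.2 == t)) := by
    have := countP_range_adjacent (fun a b => !(a == b) && !(b == t)) (t :: r)
    simp only [List.length_cons, Nat.add_sub_cancel, List.tail_cons] at this
    rw [← this]
    refine List.countP_congr ?_
    intro k _
    simp only [Function.comp_def]
    have h1 : PySem.List.pyGetD (t :: r) ((k : Nat) : Int) ' ' = (t :: r).getD k ' ' :=
      PySem.List.pyGetD_natCast _ _ _
    have h2 : PySem.List.pyGetD (t :: r) (((k : Nat) : Int) + 1) ' ' = (t :: r).getD (k + 1) ' ' := by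
      have : (((k : Nat) : Int) + 1) = (((k + 1 : Nat) : Nat) : Int) := by push_cast; ring
      rw [this, PySem.List.pyGetD_natCast]
    rw [h1, h2]
    simp
  rw [hA]
  -- now pure counting arithmetic
  have htail : ((t :: r).zip r) = ((t :: r).zip (t :: r).tail) := by simp
  have hsplit := countP_split ((t :: r).zip r) (fun q => !(q.2 == t)) (fun q => q.1 == q.2)
  have hsnd : ((t :: r).zip r).countP (fun q => !(q.2 == t)) = r.countP (fun c => !(c == t)) := by
    have hm := List.countP_map (p := fun c : Char => !(c == t)) (f := Prod.snd)
      (l := (t :: r).zip r)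
    simp only [Function.comp_def] at hm
    rw [← hm, htail, map_snd_zip_tail, List.tail_cons]
  have hcnt : r.countP (fun c => !(c == t)) + r.count t = r.length := by
    rw [List.count_eq_countP]
    have h := List.length_eq_countP_add_countP (p := fun c : Char => c == t) (l := r)
    simp only [decide_not, Bool.decide_eq_true] at h
    omega
  have hAB : ((t :: r).zip r).countP (fun q => !(q.2 == t) && (q.1 == q.2)) =
      ((t :: r).zip r).countP (fun q => (q.1 == q.2) && !(q.2 == t)) :=
    List.countP_congr (by intro q _; simp [Bool.and_comm])
  have hBA : ((t :: r).zip r).countP (fun q => !(q.2 == t) && !(q.1 == q.2)) =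
      ((t :: r).zip r).countP (fun q => !(q.1 == q.2) && !(q.2 == t)) :=
    List.countP_congr (by intro q _; simp [Bool.and_comm])
  rw [hAB, hBA] at hsplit
  rw [hsnd] at hsplit
  have hlen2 : PySem.List.len (t :: r) = ((r.length : Nat) : Int) + 1 := by
    simp [PySem.List.len]
  rw [hlen2, List.count_cons_self]
  omega

-- ===== VERDICT (by name: the statement is the Claim_ definition above) =====
theorem solution_spec : Claim_equal_solution := by
  intro s _ hpre
  unfold Spec_solution solution solution_alt
  obtain ⟨t, r, hl⟩ : ∃ t r, s.toList = t :: r := by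
    cases h : s.toList with
    | nil => exact absurd (by rw [← s.ofList_toList, h]) hpre
    | cons a b => exact ⟨a, b, rfl⟩
  simp only [hl]
  have hget : PySem.Chars.pyGet? (t :: r) 0 = some t := by
    simp [PySem.Chars.pyGet?, PySem.List.pyGet?, PySem.List.pyIdx?]
  rw [hget]
  split_ifs with h
  · rfl
  · exact solution_core t r
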